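-- pv_equiv track=rewrite | github.com/jwnwilson/nw_rig | NWUtilitiesPackage/NWUtilitiesString.py | removePrefixByChar
-- ===== SOURCE A (Python) =====
-- def removePrefixByChar(name,char):
--     split = name.split(char)
--     ret= ""
--     if len(split) == 1:
--         return split[0]
--     for x in range(1,len(split)):
--         if x != (len(split)-1):
--             ret += (split[x] + "_")
--         else:
--             ret += (split[x])
--     return ret
-- ===== SOURCE B (Python) =====
-- def removePrefixByChar(name, char):
--     before, sep, after = name.partition(char)
--     if not sep:
--         return before
--     return after.replace(char, "_")
-- ===== Notes on version B (the rewrite author's own statement) =====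
-- stated objective: idiomatic
-- what changed: instead of splitting the whole string into a list of pieces and re-joining them with an index loop, B locates the first delimiter once with str.partition and rewrites every later occurrence in the suffix with one str.replace, never building a list
import Mathlib
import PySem

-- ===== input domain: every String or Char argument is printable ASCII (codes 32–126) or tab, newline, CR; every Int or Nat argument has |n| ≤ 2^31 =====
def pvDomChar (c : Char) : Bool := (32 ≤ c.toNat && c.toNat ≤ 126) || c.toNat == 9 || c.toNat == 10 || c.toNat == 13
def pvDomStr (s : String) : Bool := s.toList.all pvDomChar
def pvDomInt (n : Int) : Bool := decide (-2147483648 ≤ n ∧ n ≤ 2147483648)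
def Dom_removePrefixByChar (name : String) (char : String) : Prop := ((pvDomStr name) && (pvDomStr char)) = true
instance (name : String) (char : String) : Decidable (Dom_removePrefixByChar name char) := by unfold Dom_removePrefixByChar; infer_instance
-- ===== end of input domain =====

-- B replaces A's split-into-a-list + index-loop join by locating the first delimiter once
-- (str.partition) and rewriting later occurrences in the suffix with one str.replace (idiomatic; same cost).


-- ===== PORT A =====
-- literal port of A: split, early return on a single piece, then an index loop
-- from 1 to len-1 appending piece+"_" except at the last index.
def removePrefixByChar (name : String) (char : String) : String :=
  match PySem.Chars.split? name.toList char.toList with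
  | none => ""   -- Python raises ValueError here (char = ""); excluded by Pre_
  | some split =>
    if split.length = 1 then
      String.ofList ((PySem.List.pyGet? split (0 : Int)).getD [])
    else
      String.ofList ((PySem.List.pyRange 1 (split.length : Int) 1).foldl
        (fun ret x =>
          if x ≠ (split.length : Int) - 1 then
            ret ++ (PySem.List.pyGetD split x []) ++ ['_']
          else
            ret ++ (PySem.List.pyGetD split x [])) [])

-- ===== PORT B =====
-- name.partition(char), ported by hand via Chars.find (exact: partition cuts at the FIRST
-- occurrence, which Chars.find locates; empty separator = ValueError → none).
def pyPartition? (s : List Char) (sep : List Char) : Option (List Char × List Char × List Char) :=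
  if sep.isEmpty then none
  else
    let i := PySem.Chars.find s sep
    if i = -1 then some (s, [], [])
    else some (s.take i.toNat, sep, s.drop (i.toNat + sep.length))

-- literal port of B: before, sep, after = name.partition(char);
-- return before if sep is empty, else after.replace(char, "_")
def removePrefixByChar_alt (name : String) (char : String) : String :=
  match pyPartition? name.toList char.toList with
  | none => ""   -- Python raises ValueError here (char = ""); excluded by Pre_
  | some (before, sep, after) =>
    if sep.isEmpty then String.ofList before
    else String.ofList (PySem.Chars.replace after char.toList ['_'])

-- ===== PRECONDITION & SPEC =====
-- Pre_ excludes only char = "", on which Python raises ValueError in both A (str.split) and B (str.partition).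
def Pre_removePrefixByChar (name : String) (char : String) : Prop := char ≠ ""
instance (name : String) (char : String) : Decidable (Pre_removePrefixByChar name char) := by unfold Pre_removePrefixByChar; infer_instance
def pvWitness_removePrefixByChar : String × String := ("L_arm_IK_ctrl", "_")

def Spec_removePrefixByChar (name : String) (char : String) (out : String) : Prop := out = removePrefixByChar_alt name char
instance (name : String) (char : String) (out : String) : Decidable (Spec_removePrefixByChar name char out) := by unfold Spec_removePrefixByChar; infer_instance

-- ===== CLAIM (what is proved, stated in full; the proofs are below) =====
def Claim_equal_removePrefixByChar : Prop := ∀ (name : String) (char : String), Dom_removePrefixByChar name char → Pre_removePrefixByChar name char → Spec_removePrefixByChar name char (removePrefixByChar name char)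

-- ===== LEMMAS AND PROOFS =====

-- the list of pieces str.split produces, as a plain fuel recursion shared by both sides' proofs
def pieces (sep : List Char) : Nat → List Char → List (List Char)
  | 0, l => [l]
  | _+1, [] => [[]]
  | f+1, c::t =>
    if sep.isPrefixOf (c::t) then [] :: pieces sep f (List.drop sep.length (c::t))
    else match pieces sep f t with
         | [] => []
         | p :: ps => (c :: p) :: ps

theorem pieces_ne_nil (sep : List Char) (f : Nat) (l : List Char) : pieces sep f l ≠ [] := by
  induction f generalizing l with
  | zero => simp [pieces]
  | succ f ih =>
    cases l with
    | nil => simp [pieces]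
    | cons c t =>
      simp only [pieces]
      split
      · simp
      · cases h : pieces sep f t with
        | nil => exact absurd h (ih t)
        | cons p ps => simp


-- splitOn.go is pieces with the current piece and finished pieces as accumulators
theorem splitOn_go_eq (sep : List Char) (f : Nat) (l cur : List Char) (acc : List (List Char)) :
    PySem.Chars.splitOn.go sep f l cur acc
      = acc.reverse ++ (match pieces sep f l with
          | [] => []
          | p :: ps => (cur.reverse ++ p) :: ps) := by
  induction f generalizing l cur acc with
  | zero => simp [PySem.Chars.splitOn.go, pieces]
  | succ f ih =>
    cases l with
    | nil => simp [PySem.Chars.splitOn.go, pieces]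
    | cons c t =>
      simp only [PySem.Chars.splitOn.go, pieces]
      split
      · rw [ih]
        cases h : pieces sep f (List.drop sep.length (c :: t)) with
        | nil => exact absurd h (pieces_ne_nil sep f _)
        | cons p ps => simp
      · rw [ih]
        cases h : pieces sep f t with
        | nil => exact absurd h (pieces_ne_nil sep f t)
        | cons p ps => simp


theorem splitOn_eq_pieces (sep l : List Char) :
    PySem.Chars.splitOn l sep = pieces sep (l.length + 1) l := by
  rw [PySem.Chars.splitOn, splitOn_go_eq]
  cases h : pieces sep (l.length + 1) l with
  | nil => exact absurd h (pieces_ne_nil sep _ l)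
  | cons p ps => simp


-- replace.go computes the same scan, gluing the pieces with `new` on the fly
theorem replace_go_eq (sep new : List Char) (f : Nat) (l acc : List Char) :
    PySem.Chars.replace.go sep new f l acc
      = acc.reverse ++ List.intercalate new (pieces sep f l) := by
  induction f generalizing l acc with
  | zero => simp [PySem.Chars.replace.go, pieces, List.intercalate]
  | succ f ih =>
    cases l with
    | nil => simp [PySem.Chars.replace.go, pieces, List.intercalate]
    | cons c t =>
      simp only [PySem.Chars.replace.go, pieces]
      split
      · rw [ih]
        cases h : pieces sep f (List.drop sep.length (c :: t)) with
        | nil => exact absurd h (pieces_ne_nil sep f _)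
        | cons p ps =>
          simp [List.intercalate, List.intersperse]
      · rw [ih]
        cases h : pieces sep f t with
        | nil => exact absurd h (pieces_ne_nil sep f t)
        | cons p ps =>
          cases ps with
          | nil => simp [List.intercalate, List.intersperse]
          | cons q qs => simp [List.intercalate, List.intersperse]


theorem replace_eq_pieces (sep new l : List Char) (h : sep ≠ []) :
    PySem.Chars.replace l sep new = List.intercalate new (pieces sep l.length l) := by
  rw [PySem.Chars.replace]
  rw [if_neg (by simpa using h)]
  rw [replace_go_eq]
  simp


-- fuel irrelevance of pieces for a non-empty separator
theorem pieces_fuel_succ (sep : List Char) (h : sep ≠ []) (f : Nat) (l : List Char)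
    (hl : l.length ≤ f) : pieces sep (f+1) l = pieces sep f l := by
  induction f generalizing l with
  | zero =>
    interval_cases hlen : l.length
    · cases l with
      | nil => simp [pieces]
      | cons c t => simp at hlen
  | succ f ih =>
    cases l with
    | nil => simp [pieces]
    | cons c t =>
      simp only [pieces]
      have hsl : 1 ≤ sep.length := by cases sep <;> simp_all
      split
      · rw [ih]
        simp only [List.length_drop, List.length_cons]
        simp at hl
        omega
      · rw [ih]
        simp at hl
        omega


theorem pieces_fuel (sep : List Char) (h : sep ≠ []) (f g : Nat) (l : List Char)
    (hf : l.length ≤ f) (hg : l.length ≤ g) : pieces sep f l = pieces sep g l := by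
  suffices H : ∀ m, l.length ≤ m → pieces sep m l = pieces sep l.length l by
    rw [H f hf, H g hg]
  intro m hm
  induction m with
  | zero =>
    have : l.length = 0 := by omega
    rw [this]
  | succ m ih =>
    rcases Nat.lt_or_ge l.length (m+1) with hlt | hge
    · rw [pieces_fuel_succ sep h m l (by omega), ih (by omega)]
    · have : l.length = m + 1 := by omega
      rw [this]

-- no occurrence: a single piece
theorem pieces_of_not_infix (sep : List Char) (f : Nat) (l : List Char)
    (h : ¬ sep <:+: l) : pieces sep f l = [l] := by
  induction f generalizing l with
  | zero => simp [pieces]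
  | succ f ih =>
    cases l with
    | nil => simp [pieces]
    | cons c t =>
      simp only [pieces]
      rw [if_neg (by
        intro hp
        exact h ((List.isPrefixOf_iff_prefix.mp hp).isInfix))]
      rw [ih t (fun hi => h (List.infix_cons hi))]


-- first occurrence at k: first piece take k, rest = pieces of the remainder
theorem pieces_first (sep : List Char) (hsep : sep ≠ []) (k : Nat) (l : List Char)
    (hk : sep <+: l.drop k) (hmin : ∀ j < k, ¬ sep <+: l.drop j) :
    pieces sep l.length l
      = l.take k :: pieces sep (l.drop (k + sep.length)).length (l.drop (k + sep.length)) := by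
  induction k generalizing l with
  | zero =>
    simp only [List.drop_zero] at hk
    cases l with
    | nil =>
      rcases hk with ⟨r, hr⟩
      cases sep <;> simp_all
    | cons c t =>
      have hsl : 1 ≤ sep.length := by cases sep <;> simp_all
      simp only [List.length_cons, pieces,
        if_pos (List.isPrefixOf_iff_prefix.mpr hk)]
      simp only [List.take_zero, Nat.zero_add]
      rw [pieces_fuel sep hsep t.length (List.drop sep.length (c::t)).length
            (List.drop sep.length (c::t)) (by simp; omega) (le_refl _)]
  | succ j ih =>
    cases l with
    | nil =>
      rcases hk with ⟨r, hr⟩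
      cases sep <;> simp_all
    | cons c t =>
      have hnp : ¬ sep.isPrefixOf (c::t) = true := by
        intro hp
        exact hmin 0 (by omega) (by simpa using List.isPrefixOf_iff_prefix.mp hp)
      simp only [List.length_cons, pieces, if_neg hnp]
      have hkt : sep <+: t.drop j := by simpa using hk
      have hmint : ∀ i < j, ¬ sep <+: t.drop i := by
        intro i hi
        have := hmin (i+1) (by omega)
        simpa using this
      rw [ih t hkt hmint]
      simp only [List.take_succ_cons, List.cons.injEq, true_and]
      have hd : (c :: t).drop (j + 1 + sep.length) = t.drop (j + sep.length) := by
        have : j + 1 + sep.length = (j + sep.length) + 1 := by omega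
        rw [this, List.drop_succ_cons]
      rw [hd]


-- intercalate as "flatMap with trailing separator over all but the last piece, then the last piece"
theorem intercalate_eq_flatMap_dropLast (rest : List (List Char)) (h : rest ≠ []) :
    List.intercalate ['_'] rest
      = rest.dropLast.flatMap (fun p => p ++ ['_']) ++ rest.getLast h := by
  induction rest with
  | nil => exact absurd rfl h
  | cons a t ih =>
    cases t with
    | nil => simp [List.intercalate]
    | cons b t' =>
      have ht : (b :: t') ≠ [] := by simp
      have hcc : List.intercalate ['_'] (a :: b :: t')
          = a ++ ['_'] ++ List.intercalate ['_'] (b :: t') := by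
        simp [List.intercalate, List.intersperse]
      rw [hcc, ih ht]
      simp [List.getLast_cons ht]

-- A's index loop over [1, len) computes flatMap-with-separator on the middle pieces
-- followed by the last piece.
theorem loopA_eq (p : List Char) (rest : List (List Char)) (h : rest ≠ []) :
    (PySem.List.pyRange 1 ((p :: rest).length : Int) 1).foldl
        (fun ret x =>
          if x ≠ ((p :: rest).length : Int) - 1 then
            ret ++ (PySem.List.pyGetD (p :: rest) x []) ++ ['_']
          else
            ret ++ (PySem.List.pyGetD (p :: rest) x [])) []
      = rest.dropLast.flatMap (fun q => q ++ ['_']) ++ rest.getLast h := by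
  set l : List (List Char) := p :: rest with hl
  have h2 : 2 ≤ l.length := by
    cases rest with
    | nil => exact absurd rfl h
    | cons b t => simp [hl]
  have hlen : (1:Int) ≤ (l.length:Int) - 1 := by
    omega
  have hsplit : PySem.List.pyRange 1 (l.length : Int) 1
      = PySem.List.pyRange 1 ((l.length : Int) - 1) 1 ++ [(l.length : Int) - 1] := by
    have hh := PySem.List.pyRange_one_succ_right (a := 1) (b := (l.length:Int) - 1) hlen
    have he : (l.length : Int) - 1 + 1 = (l.length : Int) := by ring
    rw [he] at hh
    simpa using hh
  rw [hsplit, List.foldl_append]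
  have hlast : ∀ (acc : List Char),
      List.foldl (fun ret x =>
          if x ≠ (l.length : Int) - 1 then
            ret ++ (PySem.List.pyGetD l x []) ++ ['_']
          else
            ret ++ (PySem.List.pyGetD l x [])) acc [(l.length : Int) - 1]
        = acc ++ rest.getLast h := by
    intro acc
    simp only [List.foldl_cons, List.foldl_nil, if_neg (by simp : ¬ ((l.length:Int) - 1 ≠ (l.length:Int) - 1))]
    congr 1
    rw [PySem.List.pyGetD_eq_getElem l [] (by omega) (by omega)]
    have htn : ((l.length : Int) - 1).toNat = l.length - 1 := by omega
    have hgl : l.getLast (by simp [hl]) = l[l.length - 1] := List.getLast_eq_getElem _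
    have hgl2 : l.getLast (by simp [hl]) = rest.getLast h := List.getLast_cons h
    simp only [htn]
    rw [← hgl, hgl2]
  rw [hlast]
  congr 1
  have hdl : (l.dropLast.length : Int) = (l.length : Int) - 1 := by
    simp [List.length_dropLast]
    omega
  have hcongr : List.foldl (fun ret x =>
          if x ≠ (l.length : Int) - 1 then
            ret ++ (PySem.List.pyGetD l x []) ++ ['_']
          else
            ret ++ (PySem.List.pyGetD l x [])) []
        (PySem.List.pyRange 1 ((l.length : Int) - 1) 1)
      = List.foldl (fun ret x => ret ++ (PySem.List.pyGetD l.dropLast x []) ++ ['_']) []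
        (PySem.List.pyRange 1 ((l.length : Int) - 1) 1) := by
    apply PySem.List.foldl_congr_mem
    intro acc x hx
    rw [PySem.List.mem_pyRange_one] at hx
    rw [if_pos (by omega : x ≠ (l.length : Int) - 1)]
    have hxl : x < (l.length : Int) := by omega
    have hxdl : x < (l.dropLast.length : Int) := by omega
    rw [PySem.List.pyGetD_eq_getElem l [] (by omega) hxl,
        PySem.List.pyGetD_eq_getElem l.dropLast [] (by omega) hxdl]
    rw [List.getElem_dropLast]
  rw [hcongr, ← hdl,
      PySem.List.foldl_pyRange_pyGetD' l.dropLast [] (fun acc q => acc ++ q ++ ['_']) [] (by omega)]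
  have hdrop : l.dropLast.drop (1:Int).toNat = rest.dropLast := by
    cases rest with
    | nil => exact absurd rfl h
    | cons b t => simp [hl]
  rw [hdrop]
  have := PySem.List.foldl_append_eq_flatMap (fun q => q ++ ['_']) rest.dropLast ([] : List Char)
  simpa [List.append_assoc] using this

-- ===== VERDICT (by name: the statement is the Claim_ definition above) =====
theorem removePrefixByChar_spec : Claim_equal_removePrefixByChar := by
  intro name char _ hpre
  unfold Spec_removePrefixByChar removePrefixByChar removePrefixByChar_alt pyPartition?
  have hsep : char.toList ≠ [] := by
    intro h
    exact hpre (by simpa using congrArg String.ofList h)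
  have hc : char.toList.isEmpty = false := by
    cases h : char.toList with
    | nil => exact absurd h hsep
    | cons a t => simp
  simp only [PySem.Chars.split?, hc, Bool.false_eq_true, if_false]
  have hsplit : PySem.Chars.splitOn name.toList char.toList
      = pieces char.toList name.toList.length name.toList := by
    rw [splitOn_eq_pieces,
        pieces_fuel char.toList hsep (name.toList.length + 1) name.toList.length name.toList
          (by omega) (le_refl _)]
  by_cases hfind : PySem.Chars.find name.toList char.toList = -1
  · -- no occurrence: one piece, both return name
    have hni : ¬ char.toList <:+: name.toList :=
      (PySem.Chars.find_eq_neg_one_iff _ _).mp hfind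
    rw [hsplit, pieces_of_not_infix char.toList _ _ hni]
    simp [hfind, PySem.List.pyGet?, PySem.List.pyIdx?]
  · -- first occurrence at k; the tail pieces joined by '_' = replace on the suffix
    have hnn : 0 ≤ PySem.Chars.find name.toList char.toList := by
      have := PySem.Chars.neg_one_le_find name.toList char.toList
      omega
    obtain ⟨hpref, hminp⟩ := PySem.Chars.find_spec (s := name.toList) (sub := char.toList) hnn
    set k : Nat := (PySem.Chars.find name.toList char.toList).toNat with hkdef
    set after : List Char := name.toList.drop (k + char.toList.length) with hadef
    have hmin : ∀ j < k, ¬ char.toList <+: name.toList.drop j := fun j hj => hminp j hj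
    have hfirst := pieces_first char.toList hsep k name.toList hpref hmin
    rw [hsplit, hfirst]
    set rest : List (List Char) := pieces char.toList after.length after with hrdef
    have hrne : rest ≠ [] := pieces_ne_nil char.toList after.length after
    have hlen1 : ¬ ((name.toList.take k :: rest).length = 1) := by
      rcases List.exists_cons_of_ne_nil hrne with ⟨b, t, hbt⟩
      rw [hbt]; simp
    rw [if_neg hlen1, if_neg hfind]
    simp only [hc, Bool.false_eq_true, if_false]
    rw [loopA_eq (name.toList.take k) rest hrne,
        replace_eq_pieces char.toList ['_'] after hsep, ← hrdef,
        intercalate_eq_flatMap_dropLast rest hrne]
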